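-- pv_equiv track=rewrite | github.com/olDox0/Doxoade | doxoade/commands/refactor_systems/refactor_command.py | _parse_orch_args
-- ===== SOURCE A (Python) =====
-- def _parse_orch_args(args: list[str]) -> tuple[list[str], list[str]]:
--     """
--     Extrai positionals e targets de args brutos.
--
--     Suporta:
--       -t FUNC            (um valor por flag)
--       -t FUNC1 FUNC2     (vários valores até o próximo flag)
--       --target FUNC
--     """
--     positionals: list[str] = []
--     targets: list[str] = []
--     i = 0
--     while i < len(args):
--         a = args[i]
--         if a in ('-t', '--target'):
--             i += 1
--             while i < len(args) and (not args[i].startswith('-')):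
--                 targets.append(args[i])
--                 i += 1
--         elif a.startswith('-t') and len(a) > 2:
--             targets.append(a[2:])
--             i += 1
--         elif not a.startswith('-'):
--             positionals.append(a)
--             i += 1
--         else:
--             i += 1
--     return (positionals, targets)
-- ===== SOURCE B (Python) =====
-- def _parse_orch_args(args: list[str]) -> tuple[list[str], list[str]]:
--     """Single for-loop state machine with a 'collecting' flag (no manual index)."""
--     positionals: list[str] = []
--     targets: list[str] = []
--     collecting = False
--     for a in args:
--         if collecting and not a.startswith('-'):
--             targets.append(a)
--             continue
--         # dash arg ends a target run and is re-dispatched normally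
--         if a in ('-t', '--target'):
--             collecting = True
--         elif a.startswith('-t') and len(a) > 2:
--             targets.append(a[2:])
--             collecting = False
--         elif not a.startswith('-'):
--             positionals.append(a)
--             collecting = False
--         else:
--             collecting = False
--     return (positionals, targets)
-- ===== Notes on version B (the rewrite author's own statement) =====
-- stated objective: simpler
-- what changed: Replaced the nested while-loops with manual index arithmetic by a single for-loop state machine over the args with a boolean 'collecting' flag; the terminating dash argument of a target run falls through to normal dispatch instead of being left for the outer loop to re-read.
import Mathlib
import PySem

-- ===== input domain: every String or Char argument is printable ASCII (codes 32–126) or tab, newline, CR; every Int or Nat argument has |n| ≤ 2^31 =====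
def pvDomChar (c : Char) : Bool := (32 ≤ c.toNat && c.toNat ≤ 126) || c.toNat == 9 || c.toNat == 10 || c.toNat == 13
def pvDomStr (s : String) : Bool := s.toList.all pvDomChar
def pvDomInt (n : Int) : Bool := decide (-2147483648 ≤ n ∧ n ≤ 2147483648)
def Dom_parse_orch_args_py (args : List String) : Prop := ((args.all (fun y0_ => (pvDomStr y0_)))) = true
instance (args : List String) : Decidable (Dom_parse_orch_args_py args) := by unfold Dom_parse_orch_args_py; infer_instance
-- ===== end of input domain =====

-- B replaces A's nested while-loops with manual index arithmetic by a single
-- for-loop state machine carrying a 'collecting' flag (objective: simpler).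

-- ===== PORT A =====
-- inner while loop: consume non-dash args into targets, return (targets, rest)
def pyA_inner (rest : List String) (targets : List String) : List String × List String :=
  match rest with
  | [] => (targets, [])
  | x :: xs =>
    if ¬ (PySem.Str.startswith x "-" = true) then pyA_inner xs (targets ++ [x])
    else (targets, x :: xs)

-- termination measure for the outer loop (cited by decreasing_by below)
theorem pyA_inner_len (rest targets : List String) :
    (pyA_inner rest targets).2.length ≤ rest.length := by
  induction rest generalizing targets with
  | nil => simp [pyA_inner]
  | cons x xs ih =>
    simp only [pyA_inner]
    split
    · exact le_trans (ih _) (Nat.le_succ _)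
    · simp

def pyA_outer (args : List String) (pos ts : List String) : List String × List String :=
  match args with
  | [] => (pos, ts)
  | a :: rest =>
    if a = "-t" ∨ a = "--target" then
      pyA_outer (pyA_inner rest ts).2 pos (pyA_inner rest ts).1
    else if PySem.Str.startswith a "-t" = true ∧ PySem.Str.len a > 2 then
      pyA_outer rest pos (ts ++ [PySem.Str.slice a (some 2) none])
    else if ¬ (PySem.Str.startswith a "-" = true) then
      pyA_outer rest (pos ++ [a]) ts
    else
      pyA_outer rest pos ts
termination_by args.length
decreasing_by
  · exact Nat.lt_succ_of_le (pyA_inner_len rest ts)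
  all_goals simp

def parse_orch_args_py (args : List String) : List String × List String :=
  pyA_outer args [] []

-- ===== PORT B =====
-- one step of the for-loop: state = (positionals, targets, collecting)
def pyB_step (st : List String × List String × Bool) (a : String) :
    List String × List String × Bool :=
  if st.2.2 = true ∧ ¬ (PySem.Str.startswith a "-" = true) then
    (st.1, st.2.1 ++ [a], true)
  else if a = "-t" ∨ a = "--target" then
    (st.1, st.2.1, true)
  else if PySem.Str.startswith a "-t" = true ∧ PySem.Str.len a > 2 then
    (st.1, st.2.1 ++ [PySem.Str.slice a (some 2) none], false)
  else if ¬ (PySem.Str.startswith a "-" = true) then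
    (st.1 ++ [a], st.2.1, false)
  else
    (st.1, st.2.1, false)

def parse_orch_args_py_alt (args : List String) : List String × List String :=
  let st := args.foldl pyB_step ([], [], false)
  (st.1, st.2.1)

-- ===== PRECONDITION & SPEC =====
def Spec_parse_orch_args_py (args : List String) (out : List String × List String) : Prop := out = parse_orch_args_py_alt args
instance (args : List String) (out : List String × List String) : Decidable (Spec_parse_orch_args_py args out) := by unfold Spec_parse_orch_args_py; infer_instance

-- ===== CLAIM (what is proved, stated in full; the proofs are below) =====
def Claim_equal_parse_orch_args_py : Prop := ∀ (args : List String), Dom_parse_orch_args_py args → Spec_parse_orch_args_py args (parse_orch_args_py args)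

-- ===== LEMMAS AND PROOFS =====

-- on a dash-argument the step does not depend on the collecting flag
theorem pyB_step_dash (pos ts : List String) (a : String)
    (h : PySem.Chars.startswith a.toList ['-'] = true) (b : Bool) :
    pyB_step (pos, ts, b) a = pyB_step (pos, ts, false) a := by
  simp [pyB_step, h]

-- folding from a collecting state = run A's inner loop, then fold from a
-- non-collecting state on the remainder (equal except possibly the flag)
theorem pyB_collect (args : List String) : ∀ pos ts : List String,
    ((args.foldl pyB_step (pos, ts, true)).1, (args.foldl pyB_step (pos, ts, true)).2.1)
      = (((pyA_inner args ts).2.foldl pyB_step (pos, (pyA_inner args ts).1, false)).1,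
         ((pyA_inner args ts).2.foldl pyB_step (pos, (pyA_inner args ts).1, false)).2.1) := by
  induction args with
  | nil => intro pos ts; simp [pyA_inner]
  | cons x xs ih =>
    intro pos ts
    by_cases hx : PySem.Chars.startswith x.toList ['-'] = true
    · have hinner : pyA_inner (x :: xs) ts = (ts, x :: xs) := by
        simp [pyA_inner, hx]
      rw [hinner, List.foldl_cons, List.foldl_cons, pyB_step_dash pos ts x hx]
    · have hinner : pyA_inner (x :: xs) ts = pyA_inner xs (ts ++ [x]) := by
        simp [pyA_inner, hx]
      have hstep : pyB_step (pos, ts, true) x = (pos, ts ++ [x], true) := by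
        simp [pyB_step, hx]
      rw [hinner, List.foldl_cons, hstep]
      exact ih pos (ts ++ [x])

-- main invariant: A's outer loop equals B's fold from a non-collecting state
theorem pyAB (n : Nat) : ∀ (args : List String), args.length ≤ n → ∀ pos ts : List String,
    pyA_outer args pos ts
      = ((args.foldl pyB_step (pos, ts, false)).1, (args.foldl pyB_step (pos, ts, false)).2.1) := by
  induction n with
  | zero =>
    intro args hlen pos ts
    have : args = [] := List.eq_nil_of_length_eq_zero (Nat.le_zero.mp hlen)
    subst this; simp [pyA_outer]
  | succ n ih =>
    intro args hlen pos ts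
    match args with
    | [] => simp [pyA_outer]
    | a :: rest =>
      have hrest : rest.length ≤ n := Nat.lt_succ_iff.mp (by simpa using hlen)
      by_cases h1 : a = "-t" ∨ a = "--target"
      · have hstep : pyB_step (pos, ts, false) a = (pos, ts, true) := by
          rcases h1 with h | h <;> simp [pyB_step, h]
        rw [pyA_outer, if_pos h1, List.foldl_cons, hstep, pyB_collect rest pos ts]
        exact ih _ (le_trans (pyA_inner_len rest ts) hrest) pos _
      · by_cases h2 : PySem.Chars.startswith a.toList ['-', 't'] = true ∧ 2 < a.length
        · have hstep : pyB_step (pos, ts, false) a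
              = (pos, ts ++ [PySem.Str.slice a (some 2) none], false) := by
            simp [pyB_step, h1, h2.1, h2.2]
          have h2' : PySem.Str.startswith a "-t" = true ∧ PySem.Str.len a > 2 := by
            simpa using h2
          rw [pyA_outer, if_neg h1, if_pos h2', List.foldl_cons, hstep]
          exact ih rest hrest pos _
        · by_cases h3 : PySem.Chars.startswith a.toList ['-'] = true
          · have hstep : pyB_step (pos, ts, false) a = (pos, ts, false) := by
              simp [pyB_step, h1, h2, h3]
            have h3' : ¬ ¬ (PySem.Str.startswith a "-" = true) := by simpa using h3
            have h2' : ¬ (PySem.Str.startswith a "-t" = true ∧ PySem.Str.len a > 2) := by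
              simpa using h2
            rw [pyA_outer, if_neg h1, if_neg h2', if_neg h3', List.foldl_cons, hstep]
            exact ih rest hrest pos ts
          · have hstep : pyB_step (pos, ts, false) a = (pos ++ [a], ts, false) := by
              simp [pyB_step, h1, h2, h3]
            have h3' : ¬ (PySem.Str.startswith a "-" = true) := by simpa using h3
            have h2' : ¬ (PySem.Str.startswith a "-t" = true ∧ PySem.Str.len a > 2) := by
              simpa using h2
            rw [pyA_outer, if_neg h1, if_neg h2', if_pos h3', List.foldl_cons, hstep]
            exact ih rest hrest _ ts

-- ===== VERDICT (by name: the statement is the Claim_ definition above) =====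
theorem parse_orch_args_py_spec : Claim_equal_parse_orch_args_py := by
  intro args _
  unfold Spec_parse_orch_args_py parse_orch_args_py parse_orch_args_py_alt
  exact pyAB args.length args le_rfl [] []
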